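-- pv_equiv track=rewrite | github.com/NASA-ENAACT-ORG/NASA-EnAACT-Field-Campaign-Monitor | pipelines/students/student_scheduler.py | _parse_tod_cell
-- ===== SOURCE A (Python) =====
-- def _parse_tod_cell(cell: str) -> list[str]:
--     """'AM (7 - 10 AM);MD (12 - 3 PM)' → ['AM', 'MD']"""
--     result = []
--     for part in cell.split(";"):
--         p = part.strip()
--         if p.startswith("AM"):
--             result.append("AM")
--         elif p.startswith("MD"):
--             result.append("MD")
--         elif p.startswith("PM"):
--             result.append("PM")
--     return result
-- ===== SOURCE B (Python) =====
-- def _parse_tod_cell(cell: str) -> list[str]: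
--     """'AM (7 - 10 AM);MD (12 - 3 PM)' → ['AM', 'MD']"""
--     result = []
--     # DFA over the characters: 0 = at segment start (skipping whitespace),
--     # 1/2/3 = just saw 'A'/'M'/'P' at the stripped start, 4 = rest of segment.
--     state = 0
--     for ch in cell:
--         if ch == ";":
--             state = 0
--         elif state == 0:
--             if ch.isspace():
--                 pass
--             elif ch == "A":
--                 state = 1
--             elif ch == "M":
--                 state = 2
--             elif ch == "P":
--                 state = 3
--             else:
--                 state = 4
--         elif state == 1:
--             if ch == "M":
--                 result.append("AM")
--             state = 4
--         elif state == 2: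
--             if ch == "D":
--                 result.append("MD")
--             state = 4
--         elif state == 3:
--             if ch == "M":
--                 result.append("PM")
--             state = 4
--     return result
-- ===== Notes on version B (the rewrite author's own statement) =====
-- stated objective: alternative
-- what changed: Replaced the per-part split/strip/startswith loop with a single left-to-right character DFA that recognises AM/MD/PM at each stripped segment start.
import Mathlib
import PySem

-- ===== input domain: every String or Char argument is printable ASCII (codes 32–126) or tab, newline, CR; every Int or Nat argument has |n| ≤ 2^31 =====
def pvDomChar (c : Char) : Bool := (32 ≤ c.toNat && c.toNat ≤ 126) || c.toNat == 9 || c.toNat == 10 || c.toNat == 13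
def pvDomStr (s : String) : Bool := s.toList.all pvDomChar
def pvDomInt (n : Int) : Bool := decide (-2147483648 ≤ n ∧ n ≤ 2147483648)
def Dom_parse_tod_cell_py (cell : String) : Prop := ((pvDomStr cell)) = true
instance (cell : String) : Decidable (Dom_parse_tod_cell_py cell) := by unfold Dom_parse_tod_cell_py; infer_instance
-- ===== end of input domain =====

-- B replaces the per-part split/strip/startswith loop with a single-pass character DFA (alternative structure, same cost).


-- ===== PORT A =====
def parse_tod_cell_py (cell : String) : List String :=
  (PySem.Chars.splitOn cell.toList [';']).foldl
    (fun result part =>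
      let p := PySem.Chars.strip part
      if PySem.Chars.startswith p ['A', 'M'] then result ++ ["AM"]
      else if PySem.Chars.startswith p ['M', 'D'] then result ++ ["MD"]
      else if PySem.Chars.startswith p ['P', 'M'] then result ++ ["PM"]
      else result) []

-- ===== PORT B =====
-- DFA step: state 0 = at segment start (skipping whitespace), 1/2/3 = just saw 'A'/'M'/'P', 4 = rest of segment
def todStep (p : Nat × List String) (ch : Char) : Nat × List String :=
  if ch = ';' then (0, p.2)
  else if p.1 = 0 then
    if PySem.Chars.isspace ch then (0, p.2)
    else if ch = 'A' then (1, p.2)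
    else if ch = 'M' then (2, p.2)
    else if ch = 'P' then (3, p.2)
    else (4, p.2)
  else if p.1 = 1 then (4, if ch = 'M' then p.2 ++ ["AM"] else p.2)
  else if p.1 = 2 then (4, if ch = 'D' then p.2 ++ ["MD"] else p.2)
  else if p.1 = 3 then (4, if ch = 'M' then p.2 ++ ["PM"] else p.2)
  else (4, p.2)

def parse_tod_cell_py_alt (cell : String) : List String :=
  (cell.toList.foldl todStep (0, [])).2

-- ===== PRECONDITION & SPEC =====
def Spec_parse_tod_cell_py (cell : String) (out : List String) : Prop := out = parse_tod_cell_py_alt cell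
instance (cell : String) (out : List String) : Decidable (Spec_parse_tod_cell_py cell out) := by unfold Spec_parse_tod_cell_py; infer_instance

-- ===== CLAIM (what is proved, stated in full; the proofs are below) =====
def Claim_equal_parse_tod_cell_py : Prop := ∀ (cell : String), Dom_parse_tod_cell_py cell → Spec_parse_tod_cell_py cell (parse_tod_cell_py cell)

-- ===== LEMMAS AND PROOFS =====

-- structural recursion equivalent of splitting the cell at separators
def splitSemi : List Char → List (List Char)
  | [] => [[]]
  | c :: t =>
    if c = ';' then [] :: splitSemi t
    else match splitSemi t with
      | [] => [[c]]
      | h :: r => (c :: h) :: r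

def consHead (x : List Char) : List (List Char) → List (List Char)
  | [] => [x]
  | h :: r => (x ++ h) :: r

lemma splitSemi_ne_nil (s : List Char) : splitSemi s ≠ [] := by
  cases s with
  | nil => simp [splitSemi]
  | cons c t =>
    simp only [splitSemi]
    split
    · simp
    · split <;> simp_all

lemma go_eq (fuel : Nat) : ∀ (l cur : List Char) (acc : List (List Char)), l.length < fuel →
    PySem.Chars.splitOn.go [';'] fuel l cur acc = acc.reverse ++ consHead cur.reverse (splitSemi l) := by
  induction fuel with
  | zero => intro l cur acc h; omega
  | succ n ih =>
    intro l cur acc h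
    cases l with
    | nil =>
      simp [PySem.Chars.splitOn.go, splitSemi, consHead]
    | cons c rest =>
      by_cases hc : c = ';'
      · subst hc
        rw [PySem.Chars.splitOn.go]
        simp only [List.isPrefixOf, BEq.rfl, Bool.true_and, if_pos,
          List.length_cons, List.drop_succ_cons, List.length_nil, List.drop_zero]
        rw [ih rest [] ((cur.reverse) :: acc) (by simpa using Nat.lt_of_succ_lt_succ h)]
        have hne := splitSemi_ne_nil rest
        cases hs : splitSemi rest with
        | nil => exact absurd hs hne
        | cons h' r' =>
          simp [splitSemi, consHead, hs]
      · rw [PySem.Chars.splitOn.go]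
        have hpf : ([';'].isPrefixOf (c :: rest)) = false := by
          simp [List.isPrefixOf]
          exact fun hcc => absurd hcc.symm hc
        rw [hpf]
        simp only [Bool.false_eq_true, if_false]
        rw [ih rest (c :: cur) acc (by simpa using Nat.lt_of_succ_lt_succ h)]
        have hne := splitSemi_ne_nil rest
        cases hs : splitSemi rest with
        | nil => exact absurd hs hne
        | cons h' r' =>
          simp [splitSemi, consHead, hs, hc]

lemma splitOn_semi (s : List Char) : PySem.Chars.splitOn s [';'] = splitSemi s := by
  unfold PySem.Chars.splitOn
  rw [go_eq (s.length + 1) s [] [] (by omega)]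
  have hne := splitSemi_ne_nil s
  cases hs : splitSemi s with
  | nil => exact absurd hs hne
  | cons h r => simp [consHead]

-- A's per-part branch, as a list-valued function
def codeOf (part : List Char) : List String :=
  if PySem.Chars.startswith (PySem.Chars.strip part) ['A', 'M'] then ["AM"]
  else if PySem.Chars.startswith (PySem.Chars.strip part) ['M', 'D'] then ["MD"]
  else if PySem.Chars.startswith (PySem.Chars.strip part) ['P', 'M'] then ["PM"]
  else []

def gHead (c : Char) (code : String) (h : List Char) : List String :=
  if h.head? = some c then [code] else []

lemma rstrip_cons (a : Char) (t : List Char) :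
    PySem.Chars.rstrip (a :: t) =
      if PySem.Chars.rstrip t = [] then (if PySem.Chars.isspace a then [] else [a])
      else a :: PySem.Chars.rstrip t := by
  unfold PySem.Chars.rstrip
  rw [List.reverse_cons, List.dropWhile_append]
  split
  · next hcond =>
      have h0 : List.dropWhile PySem.Chars.isspace t.reverse = [] := List.isEmpty_iff.mp hcond
      rw [h0]
      simp only [List.reverse_nil, if_pos]
      by_cases ha : PySem.Chars.isspace a <;> simp [List.dropWhile, ha]
  · next hcond =>
      have h0 : List.dropWhile PySem.Chars.isspace t.reverse ≠ [] := by
        intro hx; simp [hx] at hcond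
      rw [if_neg (by simpa using h0)]
      simp

lemma rstrip_head? (l : List Char) (c : Char) (hc : PySem.Chars.isspace c = false) :
    ((PySem.Chars.rstrip l).head? = some c) ↔ (l.head? = some c) := by
  cases l with
  | nil => simp [PySem.Chars.rstrip]
  | cons a t =>
    rw [rstrip_cons]
    split
    · by_cases ha : PySem.Chars.isspace a
      · simp only [if_pos ha]
        constructor
        · intro h; simp at h
        · intro h
          simp only [List.head?_cons, Option.some.injEq] at h
          rw [h] at ha; rw [ha] at hc; cases hc
      · simp [ha]
    · simp

lemma lstrip_cons_of_space {a : Char} (ha : PySem.Chars.isspace a = true) (l : List Char) :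
    PySem.Chars.lstrip (a :: l) = PySem.Chars.lstrip l := by
  unfold PySem.Chars.lstrip
  simp [List.dropWhile, ha]

lemma lstrip_cons_of_not_space {a : Char} (ha : PySem.Chars.isspace a = false) (l : List Char) :
    PySem.Chars.lstrip (a :: l) = a :: l := by
  unfold PySem.Chars.lstrip
  simp [List.dropWhile, ha]

lemma codeOf_nil : codeOf [] = [] := by decide

lemma codeOf_space {a : Char} (ha : PySem.Chars.isspace a = true) (h : List Char) :
    codeOf (a :: h) = codeOf h := by
  unfold codeOf PySem.Chars.strip
  rw [lstrip_cons_of_space ha]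

-- the prefix test on the stripped part, for a leading letter x of a code (x, y non-space)
lemma startswith_strip_cons (x y : Char) (hx : PySem.Chars.isspace x = false)
    (hy : PySem.Chars.isspace y = false) (h : List Char) :
    PySem.Chars.startswith (PySem.Chars.strip (x :: h)) [x, y] = (h.head? = some y) := by
  unfold PySem.Chars.strip PySem.Chars.startswith
  rw [lstrip_cons_of_not_space hx, rstrip_cons]
  by_cases h0 : PySem.Chars.rstrip h = []
  · rw [if_pos h0]
    have hhead : h.head? ≠ some y := by
      intro hxy
      rcases h with _ | ⟨b, t⟩
      · simp at hxy
      · simp only [List.head?_cons, Option.some.injEq] at hxy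
        subst hxy
        rw [rstrip_cons] at h0
        split_ifs at h0 <;> simp_all
    simp [hx, List.isPrefixOf, hhead]
  · rw [if_neg h0]
    rcases hr : PySem.Chars.rstrip h with _ | ⟨b, t⟩
    · exact absurd hr h0
    · have hiff : (b = y) ↔ (h.head? = some y) := by
        rw [← rstrip_head? h y hy, hr]; simp
      by_cases hb : b = y
      · subst hb
        simp [List.isPrefixOf, hiff.mp rfl]
      · have hne : h.head? ≠ some y := fun hc => hb (hiff.mpr hc)
        simp [List.isPrefixOf, hne, Ne.symm hb]

lemma startswith_strip_cons_ne (x : Char) (hx : PySem.Chars.isspace x = false)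
    (z y : Char) (hzx : z ≠ x) (h : List Char) :
    PySem.Chars.startswith (PySem.Chars.strip (x :: h)) [z, y] = false := by
  unfold PySem.Chars.strip PySem.Chars.startswith
  rw [lstrip_cons_of_not_space hx, rstrip_cons]
  split
  · simp [List.isPrefixOf, hx]
  · simp [List.isPrefixOf, hzx]

lemma codeOf_A (h : List Char) : codeOf ('A' :: h) = gHead 'M' "AM" h := by
  unfold codeOf gHead
  simp only [startswith_strip_cons 'A' 'M' (by decide) (by decide) h,
    startswith_strip_cons_ne 'A' (by decide) 'M' 'D' (by decide) h,
    startswith_strip_cons_ne 'A' (by decide) 'P' 'M' (by decide) h]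
  by_cases hm : h.head? = some 'M' <;> simp [hm]

lemma codeOf_M (h : List Char) : codeOf ('M' :: h) = gHead 'D' "MD" h := by
  unfold codeOf gHead
  simp only [startswith_strip_cons_ne 'M' (by decide) 'A' 'M' (by decide) h,
    startswith_strip_cons 'M' 'D' (by decide) (by decide) h,
    startswith_strip_cons_ne 'M' (by decide) 'P' 'M' (by decide) h]
  by_cases hm : h.head? = some 'D' <;> simp [hm]

lemma codeOf_P (h : List Char) : codeOf ('P' :: h) = gHead 'M' "PM" h := by
  unfold codeOf gHead
  simp only [startswith_strip_cons_ne 'P' (by decide) 'A' 'M' (by decide) h,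
    startswith_strip_cons_ne 'P' (by decide) 'M' 'D' (by decide) h,
    startswith_strip_cons 'P' 'M' (by decide) (by decide) h]
  by_cases hm : h.head? = some 'M' <;> simp [hm]

lemma codeOf_other {c : Char} (hc : PySem.Chars.isspace c = false)
    (hA : c ≠ 'A') (hM : c ≠ 'M') (hP : c ≠ 'P') (h : List Char) :
    codeOf (c :: h) = [] := by
  unfold codeOf
  simp only [startswith_strip_cons_ne c hc 'A' 'M' (fun e => hA e.symm) h,
    startswith_strip_cons_ne c hc 'M' 'D' (fun e => hM e.symm) h,
    startswith_strip_cons_ne c hc 'P' 'M' (fun e => hP e.symm) h]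
  simp

lemma todStep_acc (st : Nat) (res : List String) (c : Char) :
    todStep (st, res) c = ((todStep (st, []) c).1, res ++ (todStep (st, []) c).2) := by
  unfold todStep
  split_ifs <;> simp

lemma foldl_todStep_acc (s : List Char) : ∀ (st : Nat) (res : List String),
    s.foldl todStep (st, res) =
      ((s.foldl todStep (st, [])).1, res ++ (s.foldl todStep (st, [])).2) := by
  induction s with
  | nil => intro st res; simp
  | cons c t ih =>
    intro st res
    rw [List.foldl_cons, List.foldl_cons, todStep_acc st res c,
      ih (todStep (st, []) c).1 (res ++ (todStep (st, []) c).2),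
      ih (todStep (st, []) c).1 ((todStep (st, []) c).2)]
    simp

-- the main invariant: the DFA run from each state, described via splitSemi
lemma dfa_states (t : List Char) :
    (t.foldl todStep (0, [])).2 = (splitSemi t).flatMap codeOf ∧
    (t.foldl todStep (4, [])).2 = ((splitSemi t).tail).flatMap codeOf ∧
    (t.foldl todStep (1, [])).2 = gHead 'M' "AM" ((splitSemi t).headI) ++ ((splitSemi t).tail).flatMap codeOf ∧
    (t.foldl todStep (2, [])).2 = gHead 'D' "MD" ((splitSemi t).headI) ++ ((splitSemi t).tail).flatMap codeOf ∧
    (t.foldl todStep (3, [])).2 = gHead 'M' "PM" ((splitSemi t).headI) ++ ((splitSemi t).tail).flatMap codeOf := by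
  induction t with
  | nil =>
    refine ⟨by simp [splitSemi, codeOf_nil], by simp [splitSemi], ?_, ?_, ?_⟩ <;>
      simp [splitSemi, gHead]
  | cons c t ih =>
    obtain ⟨ih0, ih4, ih1, ih2, ih3⟩ := ih
    obtain ⟨h, r, hs⟩ : ∃ h r, splitSemi t = h :: r := by
      cases hx : splitSemi t with
      | nil => exact absurd hx (splitSemi_ne_nil t)
      | cons h r => exact ⟨h, r, rfl⟩
    rw [hs] at ih0 ih4 ih1 ih2 ih3
    simp only [List.headI, List.tail] at ih1 ih2 ih3 ih4
    by_cases hc : c = ';'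
    · subst hc
      have hstep : ∀ st : Nat, todStep (st, ([] : List String)) ';' = (0, []) := by
        intro st; simp [todStep]
      refine ⟨?_, ?_, ?_, ?_, ?_⟩ <;>
        · rw [List.foldl_cons, hstep]
          simp [splitSemi, hs, ih0, codeOf_nil, gHead]
    · have hsplit : splitSemi (c :: t) = (c :: h) :: r := by
        simp [splitSemi, hc, hs]
      rw [hsplit]
      simp only [List.flatMap_cons, List.headI, List.tail]
      by_cases hsp : PySem.Chars.isspace c = true
      · -- whitespace at segment start
        have hstep0 : todStep (0, ([] : List String)) c = (0, []) := by
          unfold todStep; simp [hc, hsp]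
        refine ⟨?_, ?_, ?_, ?_, ?_⟩
        · rw [List.foldl_cons, hstep0, ih0, codeOf_space hsp]
          simp [List.flatMap_cons]
        · rw [List.foldl_cons]
          have : todStep (4, ([] : List String)) c = (4, []) := by
            unfold todStep; simp [hc]
          rw [this, ih4]
        · rw [List.foldl_cons]
          have : todStep (1, ([] : List String)) c = (4, if c = 'M' then [("AM" : String)] else []) := by
            unfold todStep; simp [hc]
          rw [this]
          have hcM : c ≠ 'M' := by intro h'; subst h'; exact absurd hsp (by decide)
          rw [if_neg hcM]
          rw [ih4]
          have : gHead 'M' "AM" (c :: h) = [] := by simp [gHead, hcM]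
          simp [this]
        · rw [List.foldl_cons]
          have : todStep (2, ([] : List String)) c = (4, if c = 'D' then [("MD" : String)] else []) := by
            unfold todStep; simp [hc]
          rw [this]
          have hcD : c ≠ 'D' := by intro h'; subst h'; exact absurd hsp (by decide)
          rw [if_neg hcD, ih4]
          have : gHead 'D' "MD" (c :: h) = [] := by simp [gHead, hcD]
          simp [this]
        · rw [List.foldl_cons]
          have : todStep (3, ([] : List String)) c = (4, if c = 'M' then [("PM" : String)] else []) := by
            unfold todStep; simp [hc]
          rw [this]
          have hcM : c ≠ 'M' := by intro h'; subst h'; exact absurd hsp (by decide)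
          rw [if_neg hcM, ih4]
          have : gHead 'M' "PM" (c :: h) = [] := by simp [gHead, hcM]
          simp [this]
      · -- non-space, non-';' character
        have hsp' : PySem.Chars.isspace c = false := by simpa using hsp
        refine ⟨?_, ?_, ?_, ?_, ?_⟩
        · by_cases hA : c = 'A'
          · subst hA
            rw [List.foldl_cons]
            have : todStep (0, ([] : List String)) 'A' = (1, []) := by decide
            rw [this, ih1, codeOf_A]
          · by_cases hM : c = 'M'
            · subst hM
              rw [List.foldl_cons]
              have : todStep (0, ([] : List String)) 'M' = (2, []) := by decide
              rw [this, ih2, codeOf_M]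
            · by_cases hP : c = 'P'
              · subst hP
                rw [List.foldl_cons]
                have : todStep (0, ([] : List String)) 'P' = (3, []) := by decide
                rw [this, ih3, codeOf_P]
              · rw [List.foldl_cons]
                have : todStep (0, ([] : List String)) c = (4, []) := by
                  unfold todStep; simp [hc, hsp, hA, hM, hP]
                rw [this, ih4, codeOf_other hsp' hA hM hP]
                simp
        · rw [List.foldl_cons]
          have : todStep (4, ([] : List String)) c = (4, []) := by
            unfold todStep; simp [hc]
          rw [this, ih4]
        · rw [List.foldl_cons]
          have : todStep (1, ([] : List String)) c = (4, if c = 'M' then [("AM" : String)] else []) := by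
            unfold todStep; simp [hc]
          rw [this, foldl_todStep_acc, ih4]
          simp [gHead]
        · rw [List.foldl_cons]
          have : todStep (2, ([] : List String)) c = (4, if c = 'D' then [("MD" : String)] else []) := by
            unfold todStep; simp [hc]
          rw [this, foldl_todStep_acc, ih4]
          simp [gHead]
        · rw [List.foldl_cons]
          have : todStep (3, ([] : List String)) c = (4, if c = 'M' then [("PM" : String)] else []) := by
            unfold todStep; simp [hc]
          rw [this, foldl_todStep_acc, ih4]
          simp [gHead]

-- ===== VERDICT (by name: the statement is the Claim_ definition above) =====
theorem parse_tod_cell_py_spec : Claim_equal_parse_tod_cell_py := by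
  intro cell _
  unfold Spec_parse_tod_cell_py parse_tod_cell_py parse_tod_cell_py_alt
  rw [splitOn_semi]
  have hfold : (splitSemi cell.toList).foldl
      (fun result part =>
        let p := PySem.Chars.strip part
        if PySem.Chars.startswith p ['A', 'M'] then result ++ ["AM"]
        else if PySem.Chars.startswith p ['M', 'D'] then result ++ ["MD"]
        else if PySem.Chars.startswith p ['P', 'M'] then result ++ ["PM"]
        else result) [] =
      (splitSemi cell.toList).foldl (fun result part => result ++ codeOf part) [] := by
    apply PySem.List.foldl_congr_mem
    intro acc x _
    simp only [codeOf]
    split_ifs <;> simp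
  rw [hfold, PySem.List.foldl_append_eq_flatMap]
  rw [(dfa_states cell.toList).1]
  simp
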